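-- pv_equiv track=rewrite | github.com/CompVis/cuneiform-sign-detection-code | lib/alignment/line_tl_alignment.py | eval_sents_dummy
-- ===== SOURCE A (Python) =====
-- from operator import itemgetter
--
-- def eval_sents_dummy(translist, targetlist, max_alternatives=3):
--     scoredict = {}
--
--     for testID, testSent in enumerate(translist):
--         scores = []
--
--         for refID, refSent in enumerate(targetlist):
--             score = 100 - abs(len(testSent) - len(refSent))  # replace this with your own similarity score
--             if score > 0:
--                 scores.append((score, refID, score))
--         # sorted by first item in tuple (i.e. score)
--         scoredict[testID] = sorted(scores, key=itemgetter(0), reverse=True)[:max_alternatives]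
--
--     return scoredict
-- ===== SOURCE B (Python) =====
-- def eval_sents_dummy(translist, targetlist, max_alternatives=3):
--     # Counting-sort by length distance: score = 100 - d, so bucket candidates by
--     # d = |len(test) - len(ref)| (0..99) and concatenate buckets in increasing d;
--     # within a bucket refIDs appear in order, which is exactly the stable
--     # descending sort A computes -- no comparison sort needed.
--     reflens = [len(s) for s in targetlist]
--     result = {}
--     for testID, testSent in enumerate(translist):
--         L = len(testSent)
--         buckets = [[] for _ in range(100)]
--         for refID, rl in enumerate(reflens):
--             d = abs(L - rl)
--             if d < 100:
--                 buckets[d].append((100 - d, refID, 100 - d))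
--         flat = [t for b in buckets for t in b]
--         result[testID] = flat[:max_alternatives]
--     return result
-- ===== Notes on version B (the rewrite author's own statement) =====
-- stated objective: alternative
-- what changed: A builds a score list per test sentence and stably comparison-sorts it descending before truncating; B never sorts: it counting-sorts candidates into the 100 possible length-distance buckets (distance d gives score 100-d) and concatenates the buckets in increasing distance order, which reproduces the stable descending order exactly.
import Mathlib
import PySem

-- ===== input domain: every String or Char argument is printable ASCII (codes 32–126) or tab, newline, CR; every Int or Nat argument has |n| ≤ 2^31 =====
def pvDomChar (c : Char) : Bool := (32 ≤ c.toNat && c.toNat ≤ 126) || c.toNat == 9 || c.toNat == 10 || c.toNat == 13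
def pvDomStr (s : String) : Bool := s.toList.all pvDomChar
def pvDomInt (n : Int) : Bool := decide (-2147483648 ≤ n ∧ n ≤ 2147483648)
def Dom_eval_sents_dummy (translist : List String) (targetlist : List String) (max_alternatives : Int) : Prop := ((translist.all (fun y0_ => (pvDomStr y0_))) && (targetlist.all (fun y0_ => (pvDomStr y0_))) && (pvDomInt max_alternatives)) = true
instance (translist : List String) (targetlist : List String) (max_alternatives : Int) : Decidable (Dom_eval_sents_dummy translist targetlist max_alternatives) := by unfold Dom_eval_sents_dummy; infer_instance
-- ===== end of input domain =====

-- B replaces A's per-test stable comparison sort by a counting sort over the 100 possible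
-- length-distance buckets (objective: alternative — a genuinely different, sort-free algorithm).

-- ===== PORT A =====
-- literal port of A; the tuple (score, refID, score) is encoded as the 3-element list
-- [score, refID, score]; itemgetter(0) is ported as (·.headD 0), exact here because every
-- element of `scores` is such a non-empty 3-element list.
def eval_sents_dummy (translist : List String) (targetlist : List String) (max_alternatives : Int) : List (Int × List (List Int)) :=
  ((PySem.List.enumerate translist 0).foldl (fun scoredict p =>
      let scores : List (List Int) := (PySem.List.enumerate targetlist 0).foldl (fun sc q =>
          let score : Int := 100 - |PySem.Str.len p.2 - PySem.Str.len q.2|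
          if score > 0 then sc ++ [[score, q.1, score]] else sc) []
      scoredict.insert p.1
        (PySem.List.slice (PySem.List.sorted scores (fun t => t.headD 0) true) none (some max_alternatives)))
    PySem.Dict.empty).items

-- ===== PORT B =====
-- one step of B's inner loop: `d = abs(L - rl); if d < 100: buckets[d].append((100-d, refID, 100-d))`
def pvBStep (L : Int) (bs : List (List (List Int))) (q : Int × Int) : List (List (List Int)) :=
  if (L - q.2).natAbs < 100 then
    bs.set (L - q.2).natAbs ((bs.getD (L - q.2).natAbs [])
      ++ [[100 - ((L - q.2).natAbs : Int), q.1, 100 - ((L - q.2).natAbs : Int)]])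
  else bs

def eval_sents_dummy_alt (translist : List String) (targetlist : List String) (max_alternatives : Int) : List (Int × List (List Int)) :=
  let reflens : List Int := targetlist.map PySem.Str.len
  ((PySem.List.enumerate translist 0).foldl (fun result p =>
      let L := PySem.Str.len p.2
      let buckets := (PySem.List.enumerate reflens 0).foldl (pvBStep L) (List.replicate 100 [])
      result.insert p.1 (PySem.List.slice buckets.flatten none (some max_alternatives)))
    PySem.Dict.empty).items

-- ===== PRECONDITION & SPEC =====
def Spec_eval_sents_dummy (translist : List String) (targetlist : List String) (max_alternatives : Int) (out : List (Int × List (List Int))) : Prop := out = eval_sents_dummy_alt translist targetlist max_alternatives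
instance (translist : List String) (targetlist : List String) (max_alternatives : Int) (out : List (Int × List (List Int))) : Decidable (Spec_eval_sents_dummy translist targetlist max_alternatives out) := by unfold Spec_eval_sents_dummy; infer_instance

-- ===== CLAIM (what is proved, stated in full; the proofs are below) =====
def Claim_equal_eval_sents_dummy : Prop := ∀ (translist : List String) (targetlist : List String) (max_alternatives : Int), Dom_eval_sents_dummy translist targetlist max_alternatives → Spec_eval_sents_dummy translist targetlist max_alternatives (eval_sents_dummy translist targetlist max_alternatives)

-- ===== LEMMAS AND PROOFS =====

-- insertBy passes over a block it never goes before
lemma pv_insertBy_append {α : Type} (bef : α → α → Bool) (x : α) (l1 l2 : List α)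
    (h : ∀ y ∈ l1, bef x y = false) :
    PySem.List.insertBy bef x (l1 ++ l2) = l1 ++ PySem.List.insertBy bef x l2 := by
  induction l1 with
  | nil => simp
  | cons a l ih =>
    simp only [List.cons_append, PySem.List.insertBy, h a (by simp)]
    simp only [Bool.false_eq_true, if_false]
    exact congrArg (a :: ·) (ih (fun y hy => h y (by simp [hy])))

-- insertBy lands at the front of a block it goes before everything of
lemma pv_insertBy_all_true {α : Type} (bef : α → α → Bool) (x : α) (l : List α)
    (h : ∀ y ∈ l, bef x y = true) :
    PySem.List.insertBy bef x l = x :: l := by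
  cases l with
  | nil => rfl
  | cons a l => simp [PySem.List.insertBy, h a (by simp)]

-- inserting x into group-concatenated xs appends x to its key group
lemma pv_insert_grouped {α : Type} (key : α → Int) (x : α) (xs : List α) :
    ∀ (vs : List Int), vs.Pairwise (fun a b => b < a) → key x ∈ vs →
    PySem.List.insertBy (fun a b => decide (key b < key a)) x
        (vs.flatMap (fun v => xs.filter (fun y => key y = v)))
      = vs.flatMap (fun v => (xs ++ [x]).filter (fun y => key y = v)) := by
  intro vs
  induction vs with
  | nil => intro _ hm; simp at hm
  | cons v vs ih =>
    intro hp hm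
    have hlt : ∀ b ∈ vs, b < v := (List.pairwise_cons.mp hp).1
    have hg : ∀ y ∈ xs.filter (fun y => key y = v), (decide (key y < key x)) = false := by
      intro y hy
      have : key y = v := by simpa using (List.mem_filter.mp hy).2
      by_cases hxv : key x = v
      · simp [this, hxv]
      · have hxm : key x ∈ vs := by
          rcases List.mem_cons.mp hm with h | h
          · exact absurd h hxv
          · exact h
        have : key y = v := this
        simp only [this, decide_eq_false_iff_not, not_lt]
        exact le_of_lt (hlt _ hxm)
    rw [List.flatMap_cons, List.flatMap_cons,
        pv_insertBy_append _ _ _ _ hg]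
    by_cases hxv : key x = v
    · -- x joins the head group
      have hrest : ∀ y ∈ vs.flatMap (fun v => xs.filter (fun y => key y = v)),
          (decide (key y < key x)) = true := by
        intro y hy
        rcases List.mem_flatMap.mp hy with ⟨v', hv', hyv'⟩
        have hk : key y = v' := by simpa using (List.mem_filter.mp hyv').2
        rw [hk, hxv, decide_eq_true_eq]
        exact hlt _ hv'
      rw [pv_insertBy_all_true _ _ _ hrest]
      have hhead : (xs ++ [x]).filter (fun y => key y = v)
          = xs.filter (fun y => key y = v) ++ [x] := by
        simp [List.filter_append, hxv]
      have htail : vs.flatMap (fun v => (xs ++ [x]).filter (fun y => key y = v))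
          = vs.flatMap (fun v => xs.filter (fun y => key y = v)) := by
        refine List.flatMap_congr (fun v' hv' => ?_)
        have : key x ≠ v' := by
          intro h
          have hvv : v' < v := hlt _ hv'
          rw [← hxv, h] at hvv
          exact lt_irrefl _ hvv
        simp [List.filter_append, this]
      rw [hhead, htail, List.append_assoc]
      simp
    · -- x belongs to a later group
      have hxm : key x ∈ vs := by
        rcases List.mem_cons.mp hm with h | h
        · exact absurd h hxv
        · exact h
      rw [ih (List.pairwise_cons.mp hp).2 hxm]
      have hhead : (xs ++ [x]).filter (fun y => key y = v)
          = xs.filter (fun y => key y = v) := by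
        simp [List.filter_append, hxv]
      rw [hhead]

-- stable reverse sort = concatenation of key groups in strictly decreasing key order
lemma pv_sorted_rev_grouped {α : Type} (key : α → Int) (vs : List Int)
    (hp : vs.Pairwise (fun a b => b < a)) :
    ∀ xs : List α, (∀ x ∈ xs, key x ∈ vs) →
    PySem.List.sorted xs key true = vs.flatMap (fun v => xs.filter (fun y => key y = v)) := by
  intro xs
  induction xs using List.reverseRecOn with
  | nil => intro _; simp [PySem.List.sorted]
  | append_singleton xs x ih =>
    intro hmem
    rw [PySem.List.sorted_rev_eq_foldl_insertBy, List.foldl_append, List.foldl_cons,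
        List.foldl_nil, ← PySem.List.sorted_rev_eq_foldl_insertBy,
        ih (fun y hy => hmem y (by simp [hy]))]
    exact pv_insert_grouped key x xs vs hp (hmem x (by simp))

-- enumerate of a mapped list
lemma pv_enumerate_map {α β : Type} (f : α → β) :
    ∀ (xs : List α) (s : Int),
    PySem.List.enumerate (xs.map f) s = (PySem.List.enumerate xs s).map (fun p => (p.1, f p.2)) := by
  intro xs
  induction xs with
  | nil => intro s; simp
  | cons a xs ih => intro s; simp [PySem.List.enumerate_cons, ih]

-- the bucket fold keeps length 100
lemma pv_bstep_length (L : Int) :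
    ∀ (l : List (Int × Int)) (bs : List (List (List Int))),
    (l.foldl (pvBStep L) bs).length = bs.length := by
  intro l
  induction l with
  | nil => intro bs; simp
  | cons q l ih =>
    intro bs
    simp only [List.foldl_cons, ih]
    unfold pvBStep
    split <;> simp

-- contents of bucket i after the fold
lemma pv_bucket_getD (L : Int) :
    ∀ (l : List (Int × Int)) (bs : List (List (List Int))), bs.length = 100 →
    ∀ i : Nat, i < 100 →
    (l.foldl (pvBStep L) bs).getD i []
      = bs.getD i [] ++ (l.filter (fun q => (L - q.2).natAbs = i)).map
          (fun q => [100 - (i : Int), q.1, 100 - (i : Int)]) := by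
  intro l
  induction l with
  | nil => intro bs _ i _; simp
  | cons q l ih =>
    intro bs hlen i hi
    simp only [List.foldl_cons, List.filter_cons]
    by_cases hd : (L - q.2).natAbs < 100
    · have hstep : pvBStep L bs q
          = bs.set (L - q.2).natAbs ((bs.getD (L - q.2).natAbs [])
              ++ [[100 - ((L - q.2).natAbs : Int), q.1, 100 - ((L - q.2).natAbs : Int)]]) := by
        unfold pvBStep; simp [hd]
      rw [hstep, ih _ (by simp [hlen]) i hi]
      by_cases hiq : (L - q.2).natAbs = i
      · subst hiq
        rw [List.getD_eq_getElem?_getD,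
            List.getElem?_set_self (by omega), Option.getD_some]
        simp [List.append_assoc]
      · rw [List.getD_eq_getElem?_getD, List.getElem?_set_ne hiq,
            ← List.getD_eq_getElem?_getD]
        simp [hiq]
    · have hstep : pvBStep L bs q = bs := by unfold pvBStep; simp [hd]
      have hne : ¬ ((L - q.2).natAbs = i) := by omega
      rw [hstep, ih _ hlen i hi]
      simp [hne]

-- flatten as a flatMap over indices
lemma pv_flatten_eq_range {α : Type} :
    ∀ (bs : List (List α)), bs.flatten = (List.range bs.length).flatMap (fun i => bs.getD i []) := by
  intro bs
  induction bs with
  | nil => simp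
  | cons b bs ih =>
    simp only [List.flatten_cons, List.length_cons, List.range_succ_eq_map,
        List.flatMap_cons, List.flatMap_map]
    rw [ih]
    rfl

-- map-filter congruence along a list (used to align A's filtered scores with B's bucket d)
lemma pv_map_filter_congr {α β : Type} (f g : α → β) (P Q : α → Bool) (l : List α)
    (hPQ : ∀ x ∈ l, P x = Q x) (hfg : ∀ x ∈ l, Q x = true → f x = g x) :
    (l.filter P).map f = (l.filter Q).map g := by
  induction l with
  | nil => rfl
  | cons a l ih =>
    have h1 := hPQ a (by simp)
    have ih' := ih (fun x hx => hPQ x (by simp [hx])) (fun x hx h => hfg x (by simp [hx]) h)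
    simp only [List.filter_cons, h1]
    by_cases hq : Q a = true
    · simp only [hq, if_true, List.map_cons, hfg a (by simp) hq, ih']
    · simp only [Bool.not_eq_true] at hq
      simp only [hq, Bool.false_eq_true, if_false, ih']

-- ---- per-test equality: A's sorted+score list equals B's flattened buckets ----
lemma pv_per_test (L : Int) (rls : List Int) :
    PySem.List.sorted
        ((PySem.List.enumerate rls 0).foldl (fun sc q =>
          if 100 - |L - q.2| > 0 then sc ++ [[100 - |L - q.2|, q.1, 100 - |L - q.2|]] else sc) [])
        (fun t => t.headD 0) true
    = ((PySem.List.enumerate rls 0).foldl (pvBStep L) (List.replicate 100 [])).flatten := by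
  set e := PySem.List.enumerate rls 0 with he
  -- A side: the score loop is filter+map
  have hscores :
      e.foldl (fun sc q =>
          if 100 - |L - q.2| > 0 then sc ++ [[100 - |L - q.2|, q.1, 100 - |L - q.2|]] else sc) []
        = (e.filter (fun q => decide (100 - |L - q.2| > 0))).map
            (fun q => [100 - |L - q.2|, q.1, 100 - |L - q.2|]) := by
    have := PySem.List.foldl_append_if (fun q : Int × Int => decide (100 - |L - q.2| > 0))
        (fun q : Int × Int => [100 - |L - q.2|, q.1, 100 - |L - q.2|]) e []
    simpa using this
  rw [hscores]
  -- the key values that occur: 100 - d for d ∈ range 100, strictly decreasing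
  have hvs : ((List.range 100).map (fun (d : Nat) => (100 - (d : Int)))).Pairwise (fun a b => b < a) := by
    refine List.pairwise_map.mpr (List.pairwise_lt_range.imp ?_)
    intro a b hab
    omega
  have hmem : ∀ x ∈ (e.filter (fun q => decide (100 - |L - q.2| > 0))).map
      (fun q => [100 - |L - q.2|, q.1, 100 - |L - q.2|]),
      (fun (t : List Int) => t.headD 0) x ∈ (List.range 100).map (fun (d : Nat) => (100 - (d : Int))) := by
    intro x hx
    rcases List.mem_map.mp hx with ⟨q, hq, rfl⟩
    have hq' : 100 - |L - q.2| > 0 := by simpa using (List.mem_filter.mp hq).2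
    have habs : (0:Int) ≤ |L - q.2| := abs_nonneg _
    have habs2 : (((L - q.2).natAbs : Nat) : Int) = |L - q.2| := Int.natCast_natAbs _
    refine List.mem_map.mpr ⟨(L - q.2).natAbs, List.mem_range.mpr (by omega), ?_⟩
    simp only [List.headD_cons]
    omega
  rw [pv_sorted_rev_grouped _ _ hvs _ hmem, List.flatMap_map]
  -- B side: flatten of the bucket fold
  have hlenB : ((e.foldl (pvBStep L) (List.replicate 100 []))).length = 100 := by
    rw [pv_bstep_length]; simp
  rw [pv_flatten_eq_range, hlenB]
  refine List.flatMap_congr (fun d hd => ?_)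
  have hd100 : d < 100 := List.mem_range.mp hd
  rw [pv_bucket_getD L e (List.replicate 100 []) (by simp) d hd100]
  simp only [List.getD_eq_getElem?_getD, List.getElem?_replicate]
  rw [List.filter_map]
  simp only [Function.comp_def, List.headD_cons]
  rw [List.filter_filter]
  simp only [hd100, if_true, Option.getD_some, List.nil_append]
  refine pv_map_filter_congr _ _ _ _ _ ?_ ?_
  · intro q _
    have hcast := Int.natCast_natAbs (L - q.2)
    by_cases h : (L - q.2).natAbs = d
    · have h1 : |L - q.2| = (d : Int) := by omega
      have h2 : (100 : Int) - |L - q.2| > 0 := by omega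
      simp [h, h1, hd100]
    · have h2 : ¬((100 : Int) - |L - q.2| = 100 - (d : Int)) := by omega
      simp [h, h2]
  · intro q _ hQ
    have hqd : (L - q.2).natAbs = d := by simpa using hQ
    have hcast := Int.natCast_natAbs (L - q.2)
    have h1 : |L - q.2| = (d : Int) := by omega
    simp [h1]

-- ===== VERDICT (by name: the statement is the Claim_ definition above) =====
theorem eval_sents_dummy_spec : Claim_equal_eval_sents_dummy := by
  intro translist targetlist max_alternatives _
  unfold Spec_eval_sents_dummy eval_sents_dummy eval_sents_dummy_alt
  refine congrArg PySem.Dict.items ?_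
  refine PySem.List.foldl_congr_mem _ _ _ _ ?_
  intro acc p _
  refine congrArg (acc.insert p.1) ?_
  refine congrArg (fun z => PySem.List.slice z none (some max_alternatives)) ?_
  -- rewrite A's inner fold over enumerate targetlist as a fold over enumerate (map len targetlist)
  have hA :
      (PySem.List.enumerate targetlist 0).foldl (fun sc q =>
          if 100 - |PySem.Str.len p.2 - PySem.Str.len q.2| > 0
          then sc ++ [[100 - |PySem.Str.len p.2 - PySem.Str.len q.2|, q.1,
                       100 - |PySem.Str.len p.2 - PySem.Str.len q.2|]] else sc) []
        = (PySem.List.enumerate (targetlist.map PySem.Str.len) 0).foldl (fun sc q =>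
          if 100 - |PySem.Str.len p.2 - q.2| > 0
          then sc ++ [[100 - |PySem.Str.len p.2 - q.2|, q.1,
                       100 - |PySem.Str.len p.2 - q.2|]] else sc) [] := by
    rw [pv_enumerate_map, List.foldl_map]
  simp only []
  rw [hA]
  exact pv_per_test (PySem.Str.len p.2) (targetlist.map PySem.Str.len)
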